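-- pv_equiv track=rewrite | github.com/bentusk-BT/apex-trade-lab-v2 | dashboard/dashboard.py | _rshapes_light
-- ===== SOURCE A (Python) =====
-- def _rshapes_light(D,RG):
--     if not D: return "[]"
--     sh,i=[],0
--     while i<len(D):
--         rg,s=RG[i],D[i]
--         while i<len(D) and RG[i]==rg: i+=1
--         c={"STRONG UPTREND":"rgba(34,197,94,.08)","UPTREND":"rgba(134,239,172,.06)","DOWNTREND":"rgba(249,115,22,.06)","STRONG DOWNTREND":"rgba(239,68,68,.08)"}.get(rg,"rgba(209,213,219,.04)")
--         sh.append(f'{{"type":"rect","xref":"x","yref":"paper","x0":"{s}","x1":"{D[i-1]}","y0":0,"y1":1,"fillcolor":"{c}","line":{{"width":0}}}}')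
--     return "["+",".join(sh)+"]"
-- ===== SOURCE B (Python) =====
-- _COLORS = {"STRONG UPTREND": "rgba(34,197,94,.08)",
--            "UPTREND": "rgba(134,239,172,.06)",
--            "DOWNTREND": "rgba(249,115,22,.06)",
--            "STRONG DOWNTREND": "rgba(239,68,68,.08)"}
--
-- def _rshapes_light(D, RG):
--     if not D: return "[]"
--     n = len(D)
--     bounds = [0] + [i for i in range(1, n) if RG[i] != RG[i - 1]] + [n]
--     sh = []
--     for start, end in zip(bounds, bounds[1:]):
--         c = _COLORS.get(RG[start], "rgba(209,213,219,.04)")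
--         sh.append(f'{{"type":"rect","xref":"x","yref":"paper","x0":"{D[start]}","x1":"{D[end-1]}","y0":0,"y1":1,"fillcolor":"{c}","line":{{"width":0}}}}')
--     return "[" + ",".join(sh) + "]"
-- ===== Notes on version B (the rewrite author's own statement) =====
-- stated objective: alternative
-- what changed: A's nested while-loops that advance an index through each regime run are replaced by two flat passes: a comprehension collecting boundary indices where RG[i] != RG[i-1], then one loop over consecutive boundary pairs emitting the shapes, with the color dict hoisted to a module constant.
import Mathlib
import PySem

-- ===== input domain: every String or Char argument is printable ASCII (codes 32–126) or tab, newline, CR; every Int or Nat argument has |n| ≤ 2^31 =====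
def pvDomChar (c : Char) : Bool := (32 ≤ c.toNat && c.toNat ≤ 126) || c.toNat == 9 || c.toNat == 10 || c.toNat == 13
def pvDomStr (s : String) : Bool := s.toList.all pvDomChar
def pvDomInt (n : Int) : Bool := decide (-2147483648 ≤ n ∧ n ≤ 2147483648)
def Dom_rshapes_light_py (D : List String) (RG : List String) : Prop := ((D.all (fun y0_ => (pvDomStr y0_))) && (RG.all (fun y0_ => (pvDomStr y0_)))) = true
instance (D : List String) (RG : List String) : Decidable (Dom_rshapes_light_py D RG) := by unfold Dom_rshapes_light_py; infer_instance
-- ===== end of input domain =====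

-- B replaces A's nested run-advancing while-loops by two flat passes (a boundary-index
-- comprehension, then one loop over consecutive boundary pairs); same output, same cost.

-- shared helpers: the color lookup (the same dict literal in both Pythons) and the f-string
def pvColor (rg : String) : String :=
  PySem.Dict.getD
    (((((PySem.Dict.empty).insert "STRONG UPTREND" "rgba(34,197,94,.08)").insert
        "UPTREND" "rgba(134,239,172,.06)").insert
        "DOWNTREND" "rgba(249,115,22,.06)").insert
        "STRONG DOWNTREND" "rgba(239,68,68,.08)")
    rg "rgba(209,213,219,.04)"

def pvShape (s x1 c : String) : String :=
  "{\"type\":\"rect\",\"xref\":\"x\",\"yref\":\"paper\",\"x0\":\"" ++ s ++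
  "\",\"x1\":\"" ++ x1 ++ "\",\"y0\":0,\"y1\":1,\"fillcolor\":\"" ++ c ++
  "\",\"line\":{\"width\":0}}"

-- ===== PORT A =====
-- inner 'while i<len(D) and RG[i]==rg: i+=1' (getD is exact under Pre_: all indices in range)
def advA (RG : List String) (n : Nat) (rg : String) (i : Nat) : Nat :=
  if h : i < n ∧ RG.getD i "" = rg then advA RG n rg (i + 1) else i
termination_by n - i
decreasing_by omega

theorem advA_gt (RG : List String) (n : Nat) (rg : String) (i : Nat)
    (h1 : i < n) (h2 : RG.getD i "" = rg) : i < advA RG n rg i := by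
  rw [advA]
  simp only [h1, h2, and_self, dite_true]
  have : i + 1 ≤ advA RG n rg (i + 1) := by
    clear h1 h2
    generalize i + 1 = j
    fun_induction advA RG n rg j with
    | case1 j h ih => omega
    | case2 j h => omega
  omega

-- the outer while-loop of A
def loopA (D RG : List String) (i : Nat) (sh : List String) : List String :=
  if h : i < D.length then
    let rg := RG.getD i ""
    let s := D.getD i ""
    let j := advA RG D.length rg i
    loopA D RG j (sh ++ [pvShape s (D.getD (j - 1) "") (pvColor rg)])
  else sh
termination_by D.length - i
decreasing_by
  have := advA_gt RG D.length (RG.getD i "") i h rfl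
  omega

def rshapes_light_py (D : List String) (RG : List String) : String :=
  if D = [] then "[]"
  else "[" ++ PySem.Str.join "," (loopA D RG 0 []) ++ "]"

-- ===== PORT B =====
-- bounds = [0] + [i for i in range(1,n) if RG[i] != RG[i-1]] + [n]
def pvBounds (RG : List String) (n : Nat) : List Nat :=
  0 :: (List.range' 1 (n - 1)).filter (fun i => RG.getD i "" ≠ RG.getD (i - 1) "") ++ [n]

def rshapes_light_py_alt (D : List String) (RG : List String) : String :=
  if D = [] then "[]"
  else
    let bounds := pvBounds RG D.length
    let sh := (bounds.zip bounds.tail).foldl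
      (fun acc p =>
        acc ++ [pvShape (D.getD p.1 "") (D.getD (p.2 - 1) "") (pvColor (RG.getD p.1 ""))]) []
    "[" ++ PySem.Str.join "," sh ++ "]"

-- ===== PRECONDITION & SPEC =====
-- Pre_ excludes exactly the inputs where Python A raises IndexError (RG shorter than a nonempty D).
def Pre_rshapes_light_py (D : List String) (RG : List String) : Prop :=
  D = [] ∨ D.length ≤ RG.length
instance (D : List String) (RG : List String) : Decidable (Pre_rshapes_light_py D RG) := by
  unfold Pre_rshapes_light_py; infer_instance

def pvWitness_rshapes_light_py : List String × List String :=
  (["2024-01-01", "2024-01-02", "2024-01-03"], ["UPTREND", "UPTREND", "DOWNTREND"])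

def Spec_rshapes_light_py (D : List String) (RG : List String) (out : String) : Prop := out = rshapes_light_py_alt D RG
instance (D : List String) (RG : List String) (out : String) : Decidable (Spec_rshapes_light_py D RG out) := by unfold Spec_rshapes_light_py; infer_instance

-- ===== CLAIM (what is proved, stated in full; the proofs are below) =====
def Claim_equal_rshapes_light_py : Prop := ∀ (D : List String) (RG : List String), Dom_rshapes_light_py D RG → Pre_rshapes_light_py D RG → Spec_rshapes_light_py D RG (rshapes_light_py D RG)

-- ===== LEMMAS AND PROOFS =====

-- the list of runs [(start, end)) A's outer loop walks through
def runsSpec (RG : List String) (n : Nat) (i : Nat) : List (Nat × Nat) :=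
  if h : i < n then
    let j := advA RG n (RG.getD i "") i
    (i, j) :: runsSpec RG n j
  else []
termination_by n - i
decreasing_by
  have := advA_gt RG n (RG.getD i "") i h rfl
  omega

theorem advA_le (RG : List String) (n : Nat) (rg : String) (i : Nat) (h : i ≤ n) :
    advA RG n rg i ≤ n := by
  fun_induction advA RG n rg i with
  | case1 j hc ih => exact ih (by omega)
  | case2 j hc => omega

theorem advA_run (RG : List String) (n : Nat) (rg : String) (i : Nat) :
    ∀ t, i ≤ t → t < advA RG n rg i → RG.getD t "" = rg := by
  fun_induction advA RG n rg i with
  | case1 j hc ih =>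
    intro t ht1 ht2
    rcases Nat.eq_or_lt_of_le ht1 with rfl | hlt
    · exact hc.2
    · exact ih t hlt ht2
  | case2 j hc =>
    intro t ht1 ht2; omega

theorem advA_stop (RG : List String) (n : Nat) (rg : String) (i : Nat)
    (h : advA RG n rg i < n) : RG.getD (advA RG n rg i) "" ≠ rg := by
  fun_induction advA RG n rg i with
  | case1 j hc ih => exact ih h
  | case2 j hc =>
    intro hEq
    exact hc ⟨h, hEq⟩

-- A's loop accumulates exactly the shapes of runsSpec
theorem loopA_eq (D RG : List String) (i : Nat) (sh : List String) :
    loopA D RG i sh = sh ++ (runsSpec RG D.length i).map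
      (fun p => pvShape (D.getD p.1 "") (D.getD (p.2 - 1) "") (pvColor (RG.getD p.1 ""))) := by
  fun_induction loopA D RG i sh with
  | case1 i sh h rg s j ih =>
    rw [ih]
    conv_rhs => rw [runsSpec]
    simp only [h, dite_true]
    simp [rg, s, j]
  | case2 i sh h =>
    rw [runsSpec]
    simp [h]

-- consecutive pairs of the boundary list from position i are exactly runsSpec from i
theorem bounds_runs (RG : List String) (n : Nat) :
    ∀ (k i : Nat), n - i ≤ k → i < n →
      ((i :: (List.range' (i + 1) (n - 1 - i)).filter
          (fun t => RG.getD t "" ≠ RG.getD (t - 1) "") ++ [n]).zip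
        ((List.range' (i + 1) (n - 1 - i)).filter
          (fun t => RG.getD t "" ≠ RG.getD (t - 1) "") ++ [n]))
        = runsSpec RG n i := by
  intro k
  induction k with
  | zero => intro i hk hi; omega
  | succ k ih =>
    intro i hk hi
    set rg := RG.getD i "" with hrg
    set j := advA RG n rg i with hj
    have hgt : i < j := advA_gt RG n rg i hi hrg.symm
    have hle : j ≤ n := advA_le RG n rg i (by omega)
    have hrun : ∀ t, i ≤ t → t < j → RG.getD t "" = rg := advA_run RG n rg i
    -- split the index range at j
    have h1 : i + 1 + 1 * (j - i - 1) = j := by omega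
    have h2 : n - j + (j - i - 1) = n - 1 - i := by omega
    have hsplit := List.range'_append (s := i + 1) (m := j - i - 1) (n := n - j) (step := 1)
    rw [h1] at hsplit
    rw [show j - i - 1 + (n - j) = n - 1 - i by omega] at hsplit
    rw [← hsplit, List.filter_append]
    -- no boundary strictly inside the run
    have hnil : (List.range' (i + 1) (j - i - 1)).filter
        (fun t => RG.getD t "" ≠ RG.getD (t - 1) "") = [] := by
      rw [List.filter_eq_nil_iff]
      intro t ht
      rw [List.mem_range'_1] at ht
      have e12 : RG.getD t "" = RG.getD (t - 1) "" := by
        rw [hrun t (by omega) (by omega), hrun (t - 1) (by omega) (by omega)]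
      rw [e12]
      simp
    rw [hnil]
    rcases Nat.lt_or_ge j n with hjn | hjn
    · -- j < n : the run ends at a boundary at j
      have hrange : List.range' j (n - j) = j :: List.range' (j + 1) (n - 1 - j) := by
        have h3 : n - j = (n - 1 - j) + 1 := by omega
        rw [h3, List.range'_succ]
      have hQ : RG.getD j "" ≠ RG.getD (j - 1) "" := by
        have e2 : RG.getD (j - 1) "" = rg := hrun (j - 1) (by omega) (by omega)
        have e1 : RG.getD j "" ≠ rg := advA_stop RG n rg i hjn
        rw [e2]; exact e1
      rw [hrange]
      rw [List.filter_cons_of_pos (by simpa using hQ)]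
      have tail := ih j (by omega) hjn
      conv_rhs => rw [runsSpec]
      simp only [hi, dite_true, ← hrg, ← hj]
      simp only [List.nil_append, List.cons_append, List.zip_cons_cons]
      exact congrArg (List.cons (i, j)) tail
    · -- j = n : last run, no boundary left
      have hjn' : j = n := by omega
      have : n - j = 0 := by omega
      rw [this]
      simp only [List.range'_zero, List.filter_nil, List.nil_append]
      conv_rhs => rw [runsSpec]
      simp only [hi, dite_true, ← hrg, ← hj, hjn']
      rw [runsSpec]
      simp

-- ===== VERDICT (by name: the statement is the Claim_ definition above) =====
theorem rshapes_light_py_spec : Claim_equal_rshapes_light_py := by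
  intro D RG _dom _pre
  unfold Spec_rshapes_light_py rshapes_light_py rshapes_light_py_alt
  by_cases hD : D = []
  · simp [hD]
  · rw [if_neg hD, if_neg hD]
    have hn : 0 < D.length := List.length_pos_iff.mpr hD
    dsimp only
    rw [PySem.List.foldl_append_singleton_eq_map, List.nil_append, loopA_eq, List.nil_append]
    unfold pvBounds
    have hb := bounds_runs RG D.length D.length 0 (by omega) hn
    simp only [Nat.sub_zero, Nat.zero_add] at hb
    simp only [List.cons_append] at hb ⊢
    rw [List.tail_cons, hb]
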